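-- pv_equiv track=rewrite | github.com/ommiy2j/Codeforces | Codeforces problemset/B/B-Fair Number.py | solve
-- ===== SOURCE A (Python) =====
-- def solve(n):
--     while(True):
--         n1=n
--         while(n1):
--             r=n1%10
--             if r!=0 and n%r!=0:
--                 break
--             n1//=10
--         if n1==0:
--             return n
--         n+=1
-- ===== SOURCE B (Python) =====
-- def solve(n):
--     def gcd(a, b):
--         return a if b == 0 else gcd(b, a % b)
--     m = n
--     while True:
--         l = 1
--         k = m
--         while k:
--             d = k % 10
--             if d != 0:
--                 l = l * d // gcd(l, d)
--             k //= 10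
--         if m % l == 0:
--             return m
--         m += 1
-- ===== Notes on version B (the rewrite author's own statement) =====
-- stated objective: alternative
-- what changed: A tests each candidate with a per-digit early-break divisibility loop; B folds the candidate's nonzero digits into a single gcd-based LCM and does one modulo test per candidate.
-- outside the precondition, e.g. on solve(-1): A returns 0, B does not finish within the time limit; on solve(-8): A returns 0, B does not finish within the time limit
import Mathlib
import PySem

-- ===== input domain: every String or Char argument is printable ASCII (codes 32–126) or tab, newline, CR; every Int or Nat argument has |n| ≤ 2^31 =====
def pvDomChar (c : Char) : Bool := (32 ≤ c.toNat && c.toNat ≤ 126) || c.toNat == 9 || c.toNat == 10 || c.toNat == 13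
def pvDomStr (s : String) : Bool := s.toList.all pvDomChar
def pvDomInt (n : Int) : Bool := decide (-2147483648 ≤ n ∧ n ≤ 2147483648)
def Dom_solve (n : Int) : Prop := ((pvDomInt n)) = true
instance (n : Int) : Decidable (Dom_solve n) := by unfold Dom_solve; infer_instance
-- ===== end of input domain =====

-- B changes the per-candidate test (digit-LCM + one modulo) — an alternative decomposition, same cost.
-- A diverges on most negative inputs; Pre_ keeps the natural nonnegative domain (see the excluded examples cited in the claim).

-- ===== PORT A =====
-- inner 'while(n1)' loop of A; fuel 64 is a totality guard only (never exhausted for the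
-- candidates reachable from Dom ∩ Pre_: they have at most 11 digits)
def innerA (n n1 : Int) (fuel : Nat) : Int :=
  match fuel with
  | 0 => n1
  | f + 1 =>
    if n1 ≠ 0 then
      let r := PySem.Int.mod n1 10
      if r ≠ 0 ∧ PySem.Int.mod n r ≠ 0 then n1
      else innerA n (PySem.Int.floordiv n1 10) f
    else n1

-- outer 'while(True)' loop of A; fuel 2521 is a totality guard only (a multiple of 2520
-- lies within 2520 steps and every such multiple is fair)
def outerA (n : Int) (fuel : Nat) : Int :=
  match fuel with
  | 0 => n
  | f + 1 => if innerA n n 64 = 0 then n else outerA (n + 1) f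

def solve (n : Int) : Int := outerA n 2521

-- ===== PORT B =====
-- termination fact for the recursive Euclid gcd in Source B
theorem pymod_natAbs_lt (a b : Int) (hb : b ≠ 0) :
    (PySem.Int.mod a b).natAbs < b.natAbs := by
  rcases lt_or_gt_of_ne hb with h | h
  · have := PySem.Int.mod_neg_bounds a h
    omega
  · have h1 := PySem.Int.mod_nonneg a h
    have h2 := PySem.Int.mod_lt a h
    omega

def gcdB (a b : Int) : Int :=
  if h : b = 0 then a else gcdB b (PySem.Int.mod a b)
termination_by b.natAbs
decreasing_by exact pymod_natAbs_lt a b h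

-- inner 'while k' loop of Source B: folds nonzero digits into the running lcm l
def lcmFold (k l : Int) (fuel : Nat) : Int :=
  match fuel with
  | 0 => l
  | f + 1 =>
    if k ≠ 0 then
      let d := PySem.Int.mod k 10
      let l' := if d ≠ 0 then PySem.Int.floordiv (l * d) (gcdB l d) else l
      lcmFold (PySem.Int.floordiv k 10) l' f
    else l

def outerB (m : Int) (fuel : Nat) : Int :=
  match fuel with
  | 0 => m
  | f + 1 =>
    if PySem.Int.mod m (lcmFold m 1 64) = 0 then m else outerB (m + 1) f

def solve_alt (n : Int) : Int := outerB n 2521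

-- ===== PRECONDITION & SPEC =====
-- Pre_ excludes negative n, where A's floor-division digit loop makes behaviour accidental:
-- A diverges on all but a handful of negative inputs (on which it returns an accidental value), and B diverges there.
def Pre_solve (n : Int) : Prop := 0 ≤ n
instance (n : Int) : Decidable (Pre_solve n) := by unfold Pre_solve; infer_instance
def pvWitness_solve : Int := 7

def Spec_solve (n : Int) (out : Int) : Prop := out = solve_alt n
instance (n : Int) (out : Int) : Decidable (Spec_solve n out) := by unfold Spec_solve; infer_instance

-- ===== CLAIM (what is proved, stated in full; the proofs are below) =====
def Claim_equal_solve : Prop := ∀ (n : Int), Dom_solve n → Pre_solve n → Spec_solve n (solve n)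

-- ===== LEMMAS AND PROOFS =====

theorem gcdB_eq (a b : Int) (ha : 0 ≤ a) (hb : 0 ≤ b) :
    gcdB a b = (Int.gcd a b : Int) := by
  by_cases h : b = 0
  · subst h
    rw [gcdB, dif_pos rfl, Int.gcd_zero_right, Int.natAbs_of_nonneg ha]
  · have hbpos : 0 < b := lt_of_le_of_ne hb (Ne.symm h)
    rw [gcdB, dif_neg h, PySem.Int.mod_eq_emod_of_pos hbpos,
      gcdB_eq b (a % b) hb (Int.emod_nonneg a (ne_of_gt hbpos)),
      Int.gcd_comm b (a % b), Int.gcd_emod]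
termination_by b.natAbs
decreasing_by
  have h1 := Int.emod_nonneg a (ne_of_gt hbpos)
  have h2 := Int.emod_lt_of_pos a hbpos
  omega

theorem lcm_step (l d : Int) (hl : 0 < l) (hd : 0 < d) :
    PySem.Int.floordiv (l * d) (gcdB l d) = (Int.lcm l d : Int) := by
  rw [gcdB_eq l d hl.le hd.le]
  have hg : 0 < (Int.gcd l d : Int) := by
    have : Int.gcd l d ≠ 0 := by
      intro h0
      exact absurd (Int.eq_zero_of_gcd_eq_zero_left h0) hl.ne'
    omega
  have hkey : (Int.gcd l d : Int) * (Int.lcm l d : Int) = l * d := by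
    have h2 : ((Int.gcd l d * Int.lcm l d : Nat) : Int) = ((l.natAbs * d.natAbs : Nat) : Int) := by
      exact_mod_cast congrArg Nat.cast (Int.gcd_mul_lcm l d)
    push_cast at h2
    rwa [abs_of_pos hl, abs_of_pos hd] at h2
  rw [PySem.Int.floordiv_eq_ediv_of_pos hg, ← hkey,
    Int.mul_ediv_cancel_left _ hg.ne']

theorem lcm_cast_pos (l d : Int) (hl : 0 < l) (hd : 0 < d) :
    0 < (Int.lcm l d : Int) := by
  have : Int.lcm l d ≠ 0 := Int.lcm_ne_zero hl.ne' hd.ne'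
  omega

-- the starting value l divides the folded lcm, which stays positive
theorem lcmFold_dvd (fuel : Nat) (k l : Int) (hk : 0 ≤ k) (hl : 0 < l) :
    l ∣ lcmFold k l fuel ∧ 0 < lcmFold k l fuel := by
  induction fuel generalizing k l with
  | zero => exact ⟨dvd_refl l, hl⟩
  | succ f ih =>
    simp only [lcmFold]
    by_cases hk0 : k = 0
    · simp [hk0, hl]
    · rw [if_pos hk0]
      have hq : 0 ≤ PySem.Int.floordiv k 10 := by
        rw [PySem.Int.floordiv_eq_ediv_of_pos (b := 10) (by norm_num)]
        exact (Int.ediv_nonneg_iff_of_pos (by norm_num)).mpr hk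
      by_cases hd : PySem.Int.mod k 10 = 0
      · rw [if_neg (fun hc => hc hd)]
        exact ih _ l hq hl
      · have hdpos : 0 < PySem.Int.mod k 10 :=
          lt_of_le_of_ne (PySem.Int.mod_nonneg k (by norm_num)) (Ne.symm hd)
        rw [if_pos hd, lcm_step l _ hl hdpos]
        obtain ⟨h1, h2⟩ := ih _ _ hq (lcm_cast_pos l _ hl hdpos)
        exact ⟨dvd_trans (Int.dvd_lcm_left l _) h1, h2⟩

-- key per-candidate fact: A's early-break digit loop reaches 0 (with l already dividing n)
-- iff B's folded lcm divides n
theorem key (fuel : Nat) (n : Int) :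
    ∀ (k l : Int), 0 ≤ k → k < 10 ^ fuel → 0 < l →
    ((innerA n k fuel = 0 ∧ l ∣ n) ↔ (lcmFold k l fuel ∣ n)) := by
  induction fuel with
  | zero =>
    intro k l hk hkf hl
    have hk0 : k = 0 := by omega
    simp [innerA, lcmFold, hk0]
  | succ f ih =>
    intro k l hk hkf hl
    simp only [innerA, lcmFold]
    by_cases hk0 : k = 0
    · simp [hk0]
    · rw [if_pos hk0, if_pos hk0]
      have hq : 0 ≤ PySem.Int.floordiv k 10 ∧ PySem.Int.floordiv k 10 < 10 ^ f := by
        rw [PySem.Int.floordiv_eq_ediv_of_pos (b := 10) (by norm_num)]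
        refine ⟨(Int.ediv_nonneg_iff_of_pos (by norm_num)).mpr hk, ?_⟩
        apply (Int.ediv_lt_iff_lt_mul (by norm_num)).mpr
        have : (10:Int) ^ (f + 1) = 10 ^ f * 10 := by ring
        omega
      have hr0 : 0 ≤ PySem.Int.mod k 10 := PySem.Int.mod_nonneg k (by norm_num)
      by_cases hbr : PySem.Int.mod k 10 ≠ 0 ∧ PySem.Int.mod n (PySem.Int.mod k 10) ≠ 0
      · rw [if_pos hbr, if_pos hbr.1]
        have hrpos : 0 < PySem.Int.mod k 10 := lt_of_le_of_ne hr0 (Ne.symm hbr.1)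
        rw [lcm_step l _ hl hrpos]
        constructor
        · rintro ⟨hkz, -⟩
          exact absurd hkz hk0
        · intro hdvd
          exfalso
          apply hbr.2
          rw [PySem.Int.mod_eq_zero_iff_dvd]
          have h1 := (lcmFold_dvd f _ _ hq.1 (lcm_cast_pos l _ hl hrpos)).1
          exact dvd_trans (Int.dvd_lcm_right l _) (dvd_trans h1 hdvd)
      · rw [if_neg hbr]
        push Not at hbr
        by_cases hd : PySem.Int.mod k 10 = 0
        · rw [if_neg (fun hc => hc hd)]
          exact ih _ l hq.1 hq.2 hl
        · have hrpos : 0 < PySem.Int.mod k 10 := lt_of_le_of_ne hr0 (Ne.symm hd)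
          have hrdvd : PySem.Int.mod k 10 ∣ n :=
            (PySem.Int.mod_eq_zero_iff_dvd n _).mp (hbr hd)
          rw [if_pos hd, lcm_step l _ hl hrpos]
          rw [← ih _ _ hq.1 hq.2 (lcm_cast_pos l _ hl hrpos)]
          constructor
          · rintro ⟨h1, h2⟩
            exact ⟨h1, Int.coe_lcm_dvd h2 hrdvd⟩
          · rintro ⟨h1, h2⟩
            exact ⟨h1, dvd_trans (Int.dvd_lcm_left l _) h2⟩

theorem pred_eq (m : Int) (hm : 0 ≤ m) (hb : m < 10 ^ 64) :
    (innerA m m 64 = 0) ↔ (PySem.Int.mod m (lcmFold m 1 64) = 0) := by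
  have h := key 64 m m 1 hm hb one_pos
  rw [PySem.Int.mod_eq_zero_iff_dvd]
  simpa using h

theorem outer_eq (fuel : Nat) (n : Int) (hn : 0 ≤ n) (hb : n + fuel ≤ 10 ^ 64) :
    outerA n fuel = outerB n fuel := by
  induction fuel generalizing n with
  | zero => rfl
  | succ f ih =>
    have hlt : n < 10 ^ 64 := by
      have : (0:Int) ≤ f := Int.natCast_nonneg f
      push_cast at hb ⊢; omega
    have hp := pred_eq n hn hlt
    rw [outerA, outerB]
    by_cases h : innerA n n 64 = 0
    · rw [if_pos h, if_pos (hp.mp h)]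
    · rw [if_neg h, if_neg (fun hc => h (hp.mpr hc))]
      exact ih (n + 1) (by omega) (by push_cast at hb ⊢; omega)

-- ===== VERDICT (by name: the statement is the Claim_ definition above) =====
theorem solve_spec : Claim_equal_solve := by
  intro n hd hp
  unfold Spec_solve solve solve_alt
  apply outer_eq 2521 n hp
  unfold Dom_solve pvDomInt at hd
  simp at hd
  norm_num
  omega
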